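-- pv_equiv track=rewrite | github.com/ismaelneto49/1-computer-science | prog1/miniteste9/tipos/tipos.py | ordena_tipos
-- ===== SOURCE A (Python) =====
-- def ordena_tipos(array):
--     inteiros = []
--     letras = []
--     tipos = []
--
--     for e in array:
--         if e.isdigit():
--             inteiros.append(e)
--         elif e.isalpha():
--             letras.append(e)
--         else:
--             tipos.append(e)
--
--     final = []
--
--     for n in inteiros:
--         final.append(n)
--     for l in letras:
--         final.append(l)
--     for t in tipos:
--         final.append(t)
--
--     return final
-- ===== SOURCE B (Python) =====
-- def ordena_tipos(array):
--     return sorted(array, key=lambda e: 0 if e.isdigit() else 1 if e.isalpha() else 2)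
-- ===== Notes on version B (the rewrite author's own statement) =====
-- stated objective: idiomatic
-- what changed: Replaces the explicit three-bucket partition plus concatenation with a single stable sorted() call keyed by 0/1/2 for digit/alpha/other, relying on sort stability to keep the original order within each bucket.
import Mathlib
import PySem

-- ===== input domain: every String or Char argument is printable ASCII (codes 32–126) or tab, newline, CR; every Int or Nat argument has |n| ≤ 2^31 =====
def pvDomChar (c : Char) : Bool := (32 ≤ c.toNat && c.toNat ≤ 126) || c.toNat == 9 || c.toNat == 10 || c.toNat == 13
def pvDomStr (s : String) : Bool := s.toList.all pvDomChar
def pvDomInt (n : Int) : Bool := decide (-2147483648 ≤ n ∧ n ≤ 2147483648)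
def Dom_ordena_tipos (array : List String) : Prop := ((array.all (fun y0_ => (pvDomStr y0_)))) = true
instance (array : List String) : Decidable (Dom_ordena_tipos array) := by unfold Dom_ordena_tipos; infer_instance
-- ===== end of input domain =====

-- B replaces the explicit three-bucket partition with one stable sort keyed by 0/1/2 (idiomatic; not faster).

-- ===== PORT A =====
-- the partition loop: three buckets threaded as one triple of lists
def ordena_tipos_fold (array : List String)
    (st : List String × List String × List String) :
    List String × List String × List String :=
  array.foldl
    (fun st e =>
      if PySem.Str.strIsdigit e then (st.1 ++ [e], st.2.1, st.2.2)
      else if PySem.Str.strIsalpha e then (st.1, st.2.1 ++ [e], st.2.2)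
      else (st.1, st.2.1, st.2.2 ++ [e]))
    st

def ordena_tipos (array : List String) : List String :=
  let st := ordena_tipos_fold array ([], [], [])
  let final := st.1.foldl (fun acc n => acc ++ [n]) []
  let final := st.2.1.foldl (fun acc l => acc ++ [l]) final
  let final := st.2.2.foldl (fun acc t => acc ++ [t]) final
  final

-- ===== PORT B =====
-- the sort key: 0 for digit strings, 1 for alphabetic, 2 for the rest
def pvKey (e : String) : Int :=
  if PySem.Str.strIsdigit e then 0 else if PySem.Str.strIsalpha e then 1 else 2

def ordena_tipos_alt (array : List String) : List String :=
  PySem.List.sorted array pvKey false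

-- ===== PRECONDITION & SPEC =====
def Spec_ordena_tipos (array : List String) (out : List String) : Prop := out = ordena_tipos_alt array
instance (array : List String) (out : List String) : Decidable (Spec_ordena_tipos array out) := by unfold Spec_ordena_tipos; infer_instance

-- ===== CLAIM (what is proved, stated in full; the proofs are below) =====
def Claim_equal_ordena_tipos : Prop := ∀ (array : List String), Dom_ordena_tipos array → Spec_ordena_tipos array (ordena_tipos array)

-- ===== LEMMAS AND PROOFS =====

theorem foldl_append_singleton (xs acc : List String) :
    xs.foldl (fun acc n => acc ++ [n]) acc = acc ++ xs := by
  induction xs generalizing acc with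
  | nil => simp
  | cons x xs ih => simp [List.foldl, ih]

theorem ordena_tipos_fold_eq (xs : List String) (i l t : List String) :
    ordena_tipos_fold xs (i, l, t) =
      (i ++ xs.filter (fun e => pvKey e == 0),
       l ++ xs.filter (fun e => pvKey e == 1),
       t ++ xs.filter (fun e => pvKey e == 2)) := by
  induction xs generalizing i l t with
  | nil => simp [ordena_tipos_fold]
  | cons x xs ih =>
    unfold ordena_tipos_fold at ih ⊢
    rw [List.foldl_cons]
    split_ifs with hd ha
    · rw [ih]; simp only [PySem.Str.strIsdigit_eq] at hd
      simp [List.filter, pvKey, hd]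
    · rw [ih]; simp only [PySem.Str.strIsdigit_eq, PySem.Str.strIsalpha_eq] at hd ha
      simp [List.filter, pvKey, hd, ha]
    · rw [ih]; simp only [PySem.Str.strIsdigit_eq, PySem.Str.strIsalpha_eq] at hd ha
      simp [List.filter, pvKey, hd, ha]

theorem insertBy_append (bef : String → String → Bool) (x : String)
    (p s : List String) (hp : ∀ y ∈ p, bef x y = false) :
    PySem.List.insertBy bef x (p ++ s) = p ++ PySem.List.insertBy bef x s := by
  induction p with
  | nil => simp
  | cons y ys ih =>
    have hy := hp y (by simp)
    simp [PySem.List.insertBy, hy, ih (fun z hz => hp z (by simp [hz]))]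

theorem insertBy_all_ge (bef : String → String → Bool) (x : String)
    (s : List String) (hs : ∀ y ∈ s, bef x y = false) :
    PySem.List.insertBy bef x s = s ++ [x] := by
  induction s with
  | nil => simp [PySem.List.insertBy]
  | cons y ys ih =>
    simp [PySem.List.insertBy, hs y (by simp), ih (fun z hz => hs z (by simp [hz]))]

theorem insertBy_all_lt (bef : String → String → Bool) (x : String)
    (s : List String) (hs : ∀ y ∈ s, bef x y = true) :
    PySem.List.insertBy bef x s = x :: s := by
  cases s with
  | nil => simp [PySem.List.insertBy]
  | cons y ys => simp [PySem.List.insertBy, hs y (by simp)]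

theorem pvKey_cases (e : String) : pvKey e = 0 ∨ pvKey e = 1 ∨ pvKey e = 2 := by
  unfold pvKey; split_ifs <;> simp

theorem sorted_fold_eq (xs f0 f1 f2 : List String)
    (h0 : ∀ y ∈ f0, pvKey y = 0) (h1 : ∀ y ∈ f1, pvKey y = 1)
    (h2 : ∀ y ∈ f2, pvKey y = 2) :
    xs.foldl (fun acc x => PySem.List.insertBy (fun a b => decide (pvKey a < pvKey b)) x acc)
        (f0 ++ f1 ++ f2) =
      (f0 ++ xs.filter (fun e => pvKey e == 0)) ++
      (f1 ++ xs.filter (fun e => pvKey e == 1)) ++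
      (f2 ++ xs.filter (fun e => pvKey e == 2)) := by
  induction xs generalizing f0 f1 f2 with
  | nil => simp
  | cons x xs ih =>
    rcases pvKey_cases x with hk | hk | hk
    · have step : PySem.List.insertBy (fun a b => decide (pvKey a < pvKey b)) x (f0 ++ f1 ++ f2)
          = (f0 ++ [x]) ++ f1 ++ f2 := by
        rw [List.append_assoc, insertBy_append _ _ f0 (f1 ++ f2)
          (by intro y hy; simp [h0 y hy, hk]),
          insertBy_all_lt _ _ (f1 ++ f2)
          (by intro y hy; rcases List.mem_append.mp hy with h | h
              · simp [h1 y h, hk]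
              · simp [h2 y h, hk])]
        simp
      rw [List.foldl_cons, step, ih (f0 ++ [x]) f1 f2
        (by intro y hy; rcases List.mem_append.mp hy with h | h
            · exact h0 y h
            · simp at h; simp [h, hk]) h1 h2]
      simp [List.filter, hk]
    · have step : PySem.List.insertBy (fun a b => decide (pvKey a < pvKey b)) x (f0 ++ f1 ++ f2)
          = f0 ++ (f1 ++ [x]) ++ f2 := by
        rw [List.append_assoc, insertBy_append _ _ f0 (f1 ++ f2)
          (by intro y hy; simp [h0 y hy, hk]),
          insertBy_append _ _ f1 f2 (by intro y hy; simp [h1 y hy, hk]),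
          insertBy_all_lt _ _ f2 (by intro y hy; simp [h2 y hy, hk])]
        simp
      rw [List.foldl_cons, step, ih f0 (f1 ++ [x]) f2 h0
        (by intro y hy; rcases List.mem_append.mp hy with h | h
            · exact h1 y h
            · simp at h; simp [h, hk]) h2]
      simp [List.filter, hk]
    · have step : PySem.List.insertBy (fun a b => decide (pvKey a < pvKey b)) x (f0 ++ f1 ++ f2)
          = f0 ++ f1 ++ (f2 ++ [x]) := by
        rw [List.append_assoc, insertBy_append _ _ f0 (f1 ++ f2)
          (by intro y hy; simp [h0 y hy, hk]),
          insertBy_append _ _ f1 f2 (by intro y hy; simp [h1 y hy, hk]),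
          insertBy_all_ge _ _ f2 (by intro y hy; simp [h2 y hy, hk])]
        simp
      rw [List.foldl_cons, step, ih f0 f1 (f2 ++ [x]) h0 h1
        (by intro y hy; rcases List.mem_append.mp hy with h | h
            · exact h2 y h
            · simp at h; simp [h, hk])]
      simp [List.filter, hk]

-- ===== VERDICT (by name: the statement is the Claim_ definition above) =====
theorem ordena_tipos_spec : Claim_equal_ordena_tipos := by
  intro array _
  unfold Spec_ordena_tipos ordena_tipos ordena_tipos_alt
  rw [ordena_tipos_fold_eq]
  simp only [foldl_append_singleton, List.nil_append]
  have := sorted_fold_eq array [] [] [] (by simp) (by simp) (by simp)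
  simp only [List.nil_append, List.append_nil] at this
  simp [PySem.List.sorted, this]
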